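-- pv_equiv track=rewrite | github.com/DrCMWither/Thingy | mb_evol/interpreter.py | malbolge_op
-- ===== SOURCE A (Python) =====
-- def malbolge_op(x, y):
--     p9 = [1, 9, 81, 729, 6561]
--     table = [
--         [4, 3, 3, 1, 0, 0, 1, 0, 0],
--         [4, 3, 5, 1, 0, 2, 1, 0, 2],
--         [5, 5, 4, 2, 2, 1, 2, 2, 1],
--         [4, 3, 3, 1, 0, 0, 7, 6, 6],
--         [4, 3, 5, 1, 0, 2, 7, 6, 8],
--         [5, 5, 4, 2, 2, 1, 8, 8, 7],
--         [7, 6, 6, 7, 6, 6, 4, 3, 3],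
--         [7, 6, 8, 7, 6, 8, 4, 3, 5],
--         [8, 8, 7, 8, 8, 7, 5, 5, 4],
--     ]
--     result = 0
--     for i in range(5):
--         result += table[y // p9[i] % 9][x // p9[i] % 9] * p9[i]
--     return result
-- ===== SOURCE B (Python) =====
-- def malbolge_op(x, y):
--     # Each base-9 digit of the original table is two base-3 trits of the
--     # fundamental 3x3 "crazy" operation, so work trit by trit instead.
--     crazy = [[1, 0, 0], [1, 0, 2], [2, 2, 1]]
--     result = 0
--     for k in range(10):
--         pk = 3 ** k
--         result += crazy[y // pk % 3][x // pk % 3] * pk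
--     return result
-- ===== Notes on version B (the rewrite author's own statement) =====
-- stated objective: alternative
-- what changed: B replaces the 9x9 precomputed base-9 table and 5 base-9 digit lookups by the fundamental 3x3 crazy-trit table applied to each of the 10 base-3 trits, changing both the data representation and the loop shape.
import Mathlib
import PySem

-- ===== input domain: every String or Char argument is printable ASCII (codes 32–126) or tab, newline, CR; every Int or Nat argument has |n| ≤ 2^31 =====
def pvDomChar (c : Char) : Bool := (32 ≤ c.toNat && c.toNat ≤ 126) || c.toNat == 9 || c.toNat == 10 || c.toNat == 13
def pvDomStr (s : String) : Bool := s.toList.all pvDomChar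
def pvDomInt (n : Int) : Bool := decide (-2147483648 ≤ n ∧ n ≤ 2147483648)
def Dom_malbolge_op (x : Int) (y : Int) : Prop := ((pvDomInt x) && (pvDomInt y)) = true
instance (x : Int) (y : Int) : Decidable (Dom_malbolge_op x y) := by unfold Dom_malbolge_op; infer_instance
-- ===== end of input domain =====

-- ===== PORT A =====
-- B rewrites A's 9x9 base-9 table as trit-wise application of the 3x3 crazy table (alternative decomposition; same cost).
-- table (a local list literal in the Python) lifted to a named constant; indices are always in range (mod 9 of a positive divisor), so pyGetD is exact.
def malbolgeTable : List (List Int) :=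
  [ [4, 3, 3, 1, 0, 0, 1, 0, 0],
    [4, 3, 5, 1, 0, 2, 1, 0, 2],
    [5, 5, 4, 2, 2, 1, 2, 2, 1],
    [4, 3, 3, 1, 0, 0, 7, 6, 6],
    [4, 3, 5, 1, 0, 2, 7, 6, 8],
    [5, 5, 4, 2, 2, 1, 8, 8, 7],
    [7, 6, 6, 7, 6, 6, 4, 3, 3],
    [7, 6, 8, 7, 6, 8, 4, 3, 5],
    [8, 8, 7, 8, 8, 7, 5, 5, 4] ]

def malbolgeP9 : List Int := [1, 9, 81, 729, 6561]

def malbolge_op (x : Int) (y : Int) : Int :=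
  (PySem.List.pyRange 0 5 1).foldl
    (fun result i =>
      let p : Int := PySem.List.pyGetD malbolgeP9 i 0   -- p9[i], i ∈ range(5), always in range
      result +
        PySem.List.pyGetD
          (PySem.List.pyGetD malbolgeTable (PySem.Int.mod (PySem.Int.floordiv y p) 9) [])
          (PySem.Int.mod (PySem.Int.floordiv x p) 9) 0 * p)
    0

-- ===== PORT B =====
def crazyTable : List (List Int) := [[1, 0, 0], [1, 0, 2], [2, 2, 1]]

def malbolge_op_alt (x : Int) (y : Int) : Int :=
  (PySem.List.pyRange 0 10 1).foldl
    (fun result k =>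
      let pk : Int := 3 ^ k.toNat   -- 3 ** k, k ∈ range(10) is nonnegative
      result +
        PySem.List.pyGetD
          (PySem.List.pyGetD crazyTable (PySem.Int.mod (PySem.Int.floordiv y pk) 3) [])
          (PySem.Int.mod (PySem.Int.floordiv x pk) 3) 0 * pk)
    0

-- ===== PRECONDITION & SPEC =====
def Spec_malbolge_op (x : Int) (y : Int) (out : Int) : Prop := out = malbolge_op_alt x y
instance (x : Int) (y : Int) (out : Int) : Decidable (Spec_malbolge_op x y out) := by unfold Spec_malbolge_op; infer_instance

-- ===== CLAIM (what is proved, stated in full; the proofs are below) =====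
def Claim_equal_malbolge_op : Prop := ∀ (x : Int) (y : Int), Dom_malbolge_op x y → Spec_malbolge_op x y (malbolge_op x y)

-- ===== LEMMAS AND PROOFS =====

-- One base-9 table entry is the two crazy-trit entries of its index trits (81 concrete cases).
lemma digit_split (A B : Int) (hA0 : 0 ≤ A) (hA9 : A < 9) (hB0 : 0 ≤ B) (hB9 : B < 9) :
    PySem.List.pyGetD (PySem.List.pyGetD malbolgeTable B []) A 0
      = PySem.List.pyGetD (PySem.List.pyGetD crazyTable (B % 3) []) (A % 3) 0
        + 3 * PySem.List.pyGetD (PySem.List.pyGetD crazyTable (B / 3) []) (A / 3) 0 := by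
  interval_cases A <;> interval_cases B <;> decide

-- The base-9 digit at weight q splits into the base-3 trits at weights q and 3*q.
lemma term_split (x y q q3 : Int) (hq : 0 < q) (hq3 : q3 = 3 * q) :
    PySem.List.pyGetD (PySem.List.pyGetD malbolgeTable (y / q % 9) []) (x / q % 9) 0
      = PySem.List.pyGetD (PySem.List.pyGetD crazyTable (y / q % 3) []) (x / q % 3) 0
        + 3 * PySem.List.pyGetD (PySem.List.pyGetD crazyTable (y / q3 % 3) []) (x / q3 % 3) 0 := by
  subst hq3
  set a := x / q with ha
  set b := y / q with hb
  have hxa : x / (3 * q) = a / 3 := by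
    rw [mul_comm, ← Int.ediv_ediv_of_nonneg (le_of_lt hq)]
  have hyb : y / (3 * q) = b / 3 := by
    rw [mul_comm, ← Int.ediv_ediv_of_nonneg (le_of_lt hq)]
  rw [hxa, hyb,
      digit_split (a % 9) (b % 9) (by omega) (by omega) (by omega) (by omega)]
  have h1 : a % 9 % 3 = a % 3 := by omega
  have h2 : b % 9 % 3 = b % 3 := by omega
  have h3 : a % 9 / 3 = a / 3 % 3 := by omega
  have h4 : b % 9 / 3 = b / 3 % 3 := by omega
  rw [h1, h2, h3, h4]

-- ===== VERDICT (by name: the statement is the Claim_ definition above) =====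
theorem malbolge_op_spec : Claim_equal_malbolge_op := by
  intro x y _
  show malbolge_op x y = malbolge_op_alt x y
  have h5 : PySem.List.pyRange 0 5 1 = [0, 1, 2, 3, 4] := by decide
  have h10 : PySem.List.pyRange 0 10 1 = [0, 1, 2, 3, 4, 5, 6, 7, 8, 9] := by decide
  simp only [malbolge_op, malbolge_op_alt, h5, h10, List.foldl]
  have p0 : PySem.List.pyGetD malbolgeP9 0 0 = 1 := by decide
  have p1 : PySem.List.pyGetD malbolgeP9 1 0 = 9 := by decide
  have p2 : PySem.List.pyGetD malbolgeP9 2 0 = 81 := by decide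
  have p3 : PySem.List.pyGetD malbolgeP9 3 0 = 729 := by decide
  have p4 : PySem.List.pyGetD malbolgeP9 4 0 = 6561 := by decide
  rw [p0, p1, p2, p3, p4]
  norm_num
  have e2 : (3:Int) ^ Int.toNat 2 = 9 := by decide
  have e3 : (3:Int) ^ Int.toNat 3 = 27 := by decide
  have e4 : (3:Int) ^ Int.toNat 4 = 81 := by decide
  have e5 : (3:Int) ^ Int.toNat 5 = 243 := by decide
  have e6 : (3:Int) ^ Int.toNat 6 = 729 := by decide
  have e7 : (3:Int) ^ Int.toNat 7 = 2187 := by decide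
  have e8 : (3:Int) ^ Int.toNat 8 = 6561 := by decide
  have e9 : (3:Int) ^ Int.toNat 9 = 19683 := by decide
  simp only [e2, e3, e4, e5, e6, e7, e8, e9]
  have t1 := term_split x y 1 3 (by norm_num) (by norm_num)
  simp only [Int.ediv_one] at t1
  rw [t1,
      term_split x y 9 27 (by norm_num) (by norm_num),
      term_split x y 81 243 (by norm_num) (by norm_num),
      term_split x y 729 2187 (by norm_num) (by norm_num),
      term_split x y 6561 19683 (by norm_num) (by norm_num)]
  ring
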